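-- pv_equiv track=rewrite | github.com/yena2bell/network-dynamics-model-analyzer | topology_analysis/FVS_analysis.py | get_combination_nodes_list
-- ===== SOURCE A (Python) =====
-- def get_combination_nodes_list(i_combination, l_selflooplessnodes):
--     i_position = 0
--     l_list_of_comb = []
--     while i_combination:
--         if i_combination%2 == 1:
--             l_list_of_comb.append(i_position)
--         i_position+=1
--         i_combination = i_combination>>1
--     l_nodes_selected = [l_selflooplessnodes[i] for i in l_list_of_comb]
--
--     return l_nodes_selected
-- ===== SOURCE B (Python) =====
-- def get_combination_nodes_list(i_combination, l_selflooplessnodes):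
--     bits = bin(i_combination)[:1:-1]  # binary digits, least-significant first
--     return [l_selflooplessnodes[pos] for pos, c in enumerate(bits) if c == '1']
-- ===== Notes on version B (the rewrite author's own statement) =====
-- stated objective: idiomatic
-- what changed: B replaces the arithmetic bit-peeling loop (%2 and >>1 into an index list, then a second indexing pass) with a single scan over the reversed binary string bin(i)[:1:-1], selecting nodes directly.
import Mathlib
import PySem

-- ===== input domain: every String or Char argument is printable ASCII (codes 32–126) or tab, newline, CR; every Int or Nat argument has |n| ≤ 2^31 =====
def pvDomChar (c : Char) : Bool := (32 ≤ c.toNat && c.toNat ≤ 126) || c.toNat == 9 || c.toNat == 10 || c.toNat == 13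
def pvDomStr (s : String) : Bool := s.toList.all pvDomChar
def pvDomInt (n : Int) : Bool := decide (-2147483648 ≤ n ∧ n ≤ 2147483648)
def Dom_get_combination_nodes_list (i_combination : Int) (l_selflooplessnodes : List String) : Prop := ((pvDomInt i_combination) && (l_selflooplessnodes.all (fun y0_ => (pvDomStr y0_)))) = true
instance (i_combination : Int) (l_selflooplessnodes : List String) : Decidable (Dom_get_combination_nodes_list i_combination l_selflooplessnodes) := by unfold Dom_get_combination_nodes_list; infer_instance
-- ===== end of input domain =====

-- B scans the reversed binary string bin(i)[:1:-1] instead of A's arithmetic bit-peeling loop (idiomatic; same cost).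


-- ===== PORT A =====
-- A's while-loop over i_combination: append the current position when i%2==1, then i >>= 1.
-- On negative i the Python loop never terminates; such inputs are outside Pre_, so the port
-- recurses on i.toNat (equal to the Python value on all admitted inputs).
def pvBitsPositions (n : Nat) (pos : Int) : List Int :=
  if n = 0 then [] else (if n % 2 = 1 then [pos] else []) ++ pvBitsPositions (n / 2) (pos + 1)
decreasing_by exact Nat.div_lt_self (Nat.pos_of_ne_zero (by assumption)) (by omega)

-- The final comprehension [l[i] for i in l_list_of_comb]; all indices are in range inside Pre_.
def get_combination_nodes_list (i_combination : Int) (l_selflooplessnodes : List String) : List String :=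
  (pvBitsPositions i_combination.toNat 0).filterMap
    (fun p => PySem.List.pyGet? l_selflooplessnodes p)

-- ===== PORT B =====
-- digits of bin(n) after the '0b' prefix, most-significant first
def pvBinRec (n : Nat) : List Char :=
  if n = 0 then [] else pvBinRec (n / 2) ++ [if n % 2 = 1 then '1' else '0']
decreasing_by exact Nat.div_lt_self (Nat.pos_of_ne_zero (by assumption)) (by omega)

def pvBinChars (i : Int) : List Char :=
  if i.natAbs = 0 then ['0'] else pvBinRec i.natAbs

-- the comprehension over enumerate(bits): select l[pos] where the char is '1'
def pvSelectOnes : List Char → Nat → List String → List String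
  | [], _, _ => []
  | c :: rest, pos, l =>
    (if c = '1' then (PySem.List.pyGet? l (pos : Int)).toList else []) ++ pvSelectOnes rest (pos + 1) l

def get_combination_nodes_list_alt (i_combination : Int) (l_selflooplessnodes : List String) : List String :=
  -- bin(i)[:1:-1] = reversed digits; for negative i the '-0b' prefix leaves a trailing 'b'
  let bits := (pvBinChars i_combination).reverse ++ (if i_combination < 0 then ['b'] else [])
  pvSelectOnes bits 0 l_selflooplessnodes

-- ===== PRECONDITION & SPEC =====
-- Exactly where Python A returns: negative i loops forever, and a set bit at position ≥ len(l)
-- (i.e. i ≥ 2^len) raises IndexError in the comprehension.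
def Pre_get_combination_nodes_list (i_combination : Int) (l_selflooplessnodes : List String) : Prop :=
  0 ≤ i_combination ∧ i_combination < 2 ^ l_selflooplessnodes.length
instance (i_combination : Int) (l_selflooplessnodes : List String) : Decidable (Pre_get_combination_nodes_list i_combination l_selflooplessnodes) := by unfold Pre_get_combination_nodes_list; infer_instance

def pvWitness_get_combination_nodes_list : Int × List String := (5, ["a", "b", "c"])

def Spec_get_combination_nodes_list (i_combination : Int) (l_selflooplessnodes : List String) (out : List String) : Prop := out = get_combination_nodes_list_alt i_combination l_selflooplessnodes
instance (i_combination : Int) (l_selflooplessnodes : List String) (out : List String) : Decidable (Spec_get_combination_nodes_list i_combination l_selflooplessnodes out) := by unfold Spec_get_combination_nodes_list; infer_instance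

-- ===== CLAIM (what is proved, stated in full; the proofs are below) =====
def Claim_equal_get_combination_nodes_list : Prop := ∀ (i_combination : Int) (l_selflooplessnodes : List String), Dom_get_combination_nodes_list i_combination l_selflooplessnodes → Pre_get_combination_nodes_list i_combination l_selflooplessnodes → Spec_get_combination_nodes_list i_combination l_selflooplessnodes (get_combination_nodes_list i_combination l_selflooplessnodes)

-- ===== LEMMAS AND PROOFS =====
lemma pvSelectOnes_binRec (n : Nat) (pos : Nat) (l : List String) :
    pvSelectOnes (pvBinRec n).reverse pos l
      = (pvBitsPositions n (pos : Int)).filterMap (fun p => PySem.List.pyGet? l p) := by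
  induction n using Nat.strong_induction_on generalizing pos with
  | _ n ih =>
    by_cases h0 : n = 0
    · simp [h0, pvBinRec, pvBitsPositions, pvSelectOnes]
    · rw [pvBinRec, pvBitsPositions]
      simp only [h0, if_false]
      rw [List.reverse_append]
      have ihn := ih (n / 2) (Nat.div_lt_self (Nat.pos_of_ne_zero h0) (by omega)) (pos + 1)
      push_cast at ihn
      by_cases hp : n % 2 = 1
      · simp only [hp, if_pos, List.reverse_singleton, List.singleton_append,
          List.filterMap_cons, pvSelectOnes, ihn, PySem.List.pyGet?_natCast]
        cases l[pos]? <;> simp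
      · simp [hp, pvSelectOnes, ihn]

-- ===== VERDICT (by name: the statement is the Claim_ definition above) =====
theorem get_combination_nodes_list_spec : Claim_equal_get_combination_nodes_list := by
  intro i l _hdom hpre
  unfold Spec_get_combination_nodes_list get_combination_nodes_list get_combination_nodes_list_alt
  obtain ⟨hnn, _⟩ := hpre
  have hneg : ¬ i < 0 := by omega
  simp only [hneg, if_false, List.append_nil]
  unfold pvBinChars
  by_cases h0 : i.natAbs = 0
  · have : i.toNat = 0 := by omega
    simp [h0, this, pvBitsPositions, pvSelectOnes]
  · have : i.natAbs = i.toNat := by omega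
    rw [this] at h0 ⊢
    rw [if_neg h0]
    have h := pvSelectOnes_binRec i.toNat 0 l
    simpa using h.symm
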